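-- pv_equiv track=rewrite | github.com/kascas/Cryptography_Experiment | Experiment4/SDES.py | KeyCreater
-- ===== SOURCE A (Python) =====
-- P10 = [3, 5, 2, 7, 4, 10, 1, 9, 8, 6]
--
-- P8 = [6, 3, 7, 4, 8, 5, 10, 9]
--
-- KEY_MOVE = [1, 2]
--
-- def KeyCreater(key, mode):
--     key_list, key_in = [], 0
--     key_in = PC_1(key)
--     # divide key_in into C and D
--     C, D = key_in >> 5, key_in & (int("0x1f", 16))
--     for i in range(2):
--         # left move
--         C, D = KeyMove(C, D, i)
--         key, key_out = (C << 5) + D, 0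
--         # key_trans_2
--         key_out = PC_2(key)
--         key_list.append(key_out)
--     if mode == 2:
--         key_list.reverse()
--     return key_list
--
-- def KeyMove(C, D, i):
--     for j in range(KEY_MOVE[i]):
--         C = ((C << 1) & int("0x1f", 16)) + (C >> 4)
--         D = ((D << 1) & int("0x1f", 16)) + (D >> 4)
--     return C, D
--
-- def PC_1(key):
--     key_in = 0
--     # key_trans_1
--     for i in range(10):
--         key_in <<= 1
--         if key & (1 << (10 - P10[i])) != 0:
--             key_in += 1
--     return key_in
--
-- def PC_2(key):
--     key_out = 0
--     for k in range(8):
--         key_out <<= 1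
--         if key & (1 << (10 - P8[k])) != 0:
--             key_out += 1
--     return key_out
-- ===== SOURCE B (Python) =====
-- P10 = [3, 5, 2, 7, 4, 10, 1, 9, 8, 6]
-- P8 = [6, 3, 7, 4, 8, 5, 10, 9]
--
-- def KeyCreater(key, mode):
--     # explicit bit-list formulation: low 10 bits of key, MSB first
--     bits = [(key >> (9 - k)) & 1 for k in range(10)]
--     perm = [bits[p - 1] for p in P10]
--     c, d = perm[:5], perm[5:]
--     keys = []
--     for shift in (1, 2):
--         c = c[shift:] + c[:shift]
--         d = d[shift:] + d[:shift]
--         combined = c + d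
--         sk = 0
--         for p in P8:
--             sk = sk * 2 + combined[p - 1]
--         keys.append(sk)
--     return keys[::-1] if mode == 2 else keys
-- ===== Notes on version B (the rewrite author's own statement) =====
-- stated objective: idiomatic
-- what changed: Replaces A's integer shift/mask arithmetic (bit-test folds for P10/P8 and rotate-via-shift-add for the halves) with an explicit 10-bit list: table permutations become index comprehensions and the cumulative left rotations become list slicing/concatenation.
import Mathlib
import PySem

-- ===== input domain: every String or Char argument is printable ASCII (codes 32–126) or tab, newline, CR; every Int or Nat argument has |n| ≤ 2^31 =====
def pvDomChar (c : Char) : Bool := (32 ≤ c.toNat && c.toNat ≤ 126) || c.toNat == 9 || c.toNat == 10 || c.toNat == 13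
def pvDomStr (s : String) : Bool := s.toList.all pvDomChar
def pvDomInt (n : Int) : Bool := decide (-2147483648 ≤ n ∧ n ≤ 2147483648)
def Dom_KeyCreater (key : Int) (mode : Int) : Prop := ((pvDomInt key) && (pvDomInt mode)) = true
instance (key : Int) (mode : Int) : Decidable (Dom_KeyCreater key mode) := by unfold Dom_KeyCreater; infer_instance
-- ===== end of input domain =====

-- B re-derives the S-DES subkeys on an explicit 10-bit list (table comprehensions + slice rotations)
-- instead of A's integer shift/mask arithmetic; objective: idiomatic, same cost.

-- ===== PORT A =====
def P10L : List Int := [3, 5, 2, 7, 4, 10, 1, 9, 8, 6]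

def P8L : List Int := [6, 3, 7, 4, 8, 5, 10, 9]

def KEY_MOVE : List Nat := [1, 2]

-- PC_1: key_in <<= 1; if key & (1 << (10 - P10[i])) != 0: key_in += 1
-- (10 - p).toNat is exact: every p in P10 satisfies 1 ≤ p ≤ 10, so 10 - p ≥ 0.
def PC1 (key : Int) : Int :=
  P10L.foldl (fun key_in p =>
    let key_in := key_in <<< 1
    if PySem.Int.band key ((1:Int) <<< ((10 - p).toNat)) ≠ 0 then key_in + 1 else key_in) 0

-- PC_2: same loop shape over P8  ((10 - p).toNat exact: 3 ≤ p ≤ 10)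
def PC2 (key : Int) : Int :=
  P8L.foldl (fun key_out p =>
    let key_out := key_out <<< 1
    if PySem.Int.band key ((1:Int) <<< ((10 - p).toNat)) ≠ 0 then key_out + 1 else key_out) 0

-- KeyMove: for j in range(KEY_MOVE[i]): C = ((C << 1) & 0x1f) + (C >> 4); likewise D
-- (int("0x1f", 16) is the literal 31)
def KeyMove (C D : Int) (i : Nat) : Int × Int :=
  (List.range (KEY_MOVE.getD i 0)).foldl (fun (s : Int × Int) _ =>
    (PySem.Int.band (s.1 <<< 1) 31 + (s.1 >>> 4), PySem.Int.band (s.2 <<< 1) 31 + (s.2 >>> 4))) (C, D)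

-- the key_list A builds before the final mode test (C = key_in >> 5, D = key_in & 0x1f)
def baseA (key : Int) : List Int :=
  let key_in := PC1 key
  let st := (List.range 2).foldl (fun (s : Int × Int × List Int) i =>
      let cd := KeyMove s.1 s.2.1 i
      (cd.1, cd.2, s.2.2 ++ [PC2 ((cd.1 <<< 5) + cd.2)])) (key_in >>> 5, PySem.Int.band key_in 31, [])
  st.2.2

def KeyCreater (key : Int) (mode : Int) : List Int :=
  let key_list := baseA key
  if mode = 2 then key_list.reverse else key_list

-- ===== PORT B =====
-- bits = [(key >> (9 - k)) & 1 for k in range(10)]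
def bitsB (key : Int) : List Int :=
  (List.range 10).map (fun (k : Nat) => PySem.Int.band (key >>> ((9:Int) - (k:Int))) 1)

-- perm/slice-rotation pipeline of Source B; list indices p - 1 are literal and in range, so getD is exact
def baseB (key : Int) : List Int :=
  let perm := [3, 5, 2, 7, 4, 10, 1, 9, 8, 6].map (fun p => (bitsB key).getD (p - 1) 0)
  let st := [1, 2].foldl (fun (s : List Int × List Int × List Int) shift =>
      let c := s.1.drop shift ++ s.1.take shift
      let d := s.2.1.drop shift ++ s.2.1.take shift
      (c, d, s.2.2 ++ [[6, 3, 7, 4, 8, 5, 10, 9].foldl (fun a p => a * 2 + (c ++ d).getD (p - 1) 0) 0]))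
    (perm.take 5, perm.drop 5, [])
  st.2.2

def KeyCreater_alt (key : Int) (mode : Int) : List Int :=
  let keys := baseB key
  if mode = 2 then keys.reverse else keys

-- ===== PRECONDITION & SPEC =====
def Spec_KeyCreater (key : Int) (mode : Int) (out : List Int) : Prop := out = KeyCreater_alt key mode
instance (key : Int) (mode : Int) (out : List Int) : Decidable (Spec_KeyCreater key mode out) := by unfold Spec_KeyCreater; infer_instance

-- ===== CLAIM (what is proved, stated in full; the proofs are below) =====
def Claim_equal_KeyCreater : Prop := ∀ (key : Int) (mode : Int), Dom_KeyCreater key mode → Spec_KeyCreater key mode (KeyCreater key mode)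

-- ===== LEMMAS AND PROOFS =====

theorem negsub_emod_even (Q : Nat) (h : Q % 2 = 0) : (-(Q:Int) - 1) % 2 = 1 := by omega

theorem negsub_emod_odd (Q : Nat) (h : Q % 2 = 1) : (-(Q:Int) - 1) % 2 = 0 := by omega

-- Python's  a & (1 << n)  is  2^n  times the n-th bit of a (two's complement)
theorem bandPow (a : Int) (n : Nat) :
    PySem.Int.band a ((1:Int) <<< n) = (a >>> n) % 2 * 2 ^ n := by
  have h1 : ((1:Int) <<< n) = 2 ^ n := by simp [Int.shiftLeft_eq]
  have hcast : ((2:Int) ^ n) = ((2 ^ n : Nat) : Int) := by push_cast; ring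
  have hb : (0:Int) ≤ 2 ^ n := by positivity
  have ht : ((2:Int) ^ n).toNat = 2 ^ n := by rw [hcast, Int.toNat_natCast]
  have hpos : (0:Nat) < 2 ^ n := Nat.two_pow_pos n
  rw [h1, Int.shiftRight_eq_div_pow]
  rcases le_or_gt 0 a with ha | ha
  · obtain ⟨m, rfl⟩ := Int.eq_ofNat_of_zero_le ha
    unfold PySem.Int.band
    rw [if_pos (by exact_mod_cast Int.natCast_nonneg m), if_pos hb]
    rw [Int.toNat_natCast, ht, Nat.and_two_pow]
    have hdiv : ((m:Int)) / (((2 ^ n : Nat)) : Int) = ((m / 2 ^ n : Nat) : Int) := by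
      push_cast; rfl
    have hemod : (((m / 2 ^ n : Nat) : Int)) % 2 = ((m / 2 ^ n % 2 : Nat) : Int) := by
      push_cast; rfl
    rw [hdiv, hemod, Nat.testBit_eq_decide_div_mod_eq]
    rcases Nat.mod_two_eq_zero_or_one (m / 2 ^ n) with h | h
    · rw [h]; norm_num
    · rw [h]; norm_num
  · set m : Nat := (-a - 1).toNat with hm
    have ham : a = -((m:Int) + 1) := by
      have : ((m:Int)) = -a - 1 := by rw [hm]; exact Int.toNat_of_nonneg (by omega)
      omega
    unfold PySem.Int.band
    rw [if_neg (by omega), if_pos hb]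
    rw [ht, Nat.two_pow_and]
    have hqr : 2 ^ n * (m / 2 ^ n) + m % 2 ^ n = m := Nat.div_add_mod m (2 ^ n)
    have hrlt : m % 2 ^ n < 2 ^ n := Nat.mod_lt _ hpos
    have hqr' : ((2:Int) ^ n) * ((m / 2 ^ n : Nat):Int) + ((m % 2 ^ n : Nat):Int) = (m:Int) := by
      exact_mod_cast congrArg (fun x : Nat => (x : Int)) hqr
    have hsplit : a = ((2 ^ n : Int) - ((m % 2 ^ n : Nat):Int) - 1) + (-(((m / 2 ^ n : Nat):Int))-1) * 2 ^ n := by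
      rw [ham]
      linear_combination hqr'
    have hdiv : a / ((2 ^ n : Nat) : Int) = -(((m / 2 ^ n : Nat):Int)) - 1 := by
      rw [← hcast, hsplit, Int.add_mul_ediv_right _ _ (by positivity)]
      rw [Int.ediv_eq_zero_of_lt (by push_cast; omega) (by push_cast; omega)]
      ring
    rw [hdiv, Nat.testBit_eq_decide_div_mod_eq]
    rcases Nat.mod_two_eq_zero_or_one (m / 2 ^ n) with h | h
    · have hd : (decide (m / 2 ^ n % 2 = 1)) = false := by simp [h]
      have he : (-(((m / 2 ^ n : Nat):Int)) - 1) % 2 = 1 := negsub_emod_even _ h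
      rw [hd, he]; simp [hcast.symm]
    · have hd : (decide (m / 2 ^ n % 2 = 1)) = true := by simp [h]
      have he : (-(((m / 2 ^ n : Nat):Int)) - 1) % 2 = 0 := negsub_emod_odd _ h
      rw [hd, he]; simp

-- A's bit test, read as "bit n of a is 1"
theorem testA (a : Int) (n : Nat) :
    (PySem.Int.band a ((1:Int) <<< n) ≠ 0) ↔ ((a >>> n) % 2 = 1) := by
  rw [bandPow]
  have hpos : (0:Int) < 2 ^ n := by positivity
  have h2 := Int.emod_two_eq_zero_or_one (a >>> n)
  constructor
  · intro h; rcases h2 with h0 | h1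
    · exact absurd (by rw [h0]; ring) h
    · exact h1
  · intro h1 hc; rw [h1] at hc; simp at hc

-- bits 0..9 only depend on key mod 1024
theorem shr_emod (key : Int) (n : Nat) (h : n < 10) :
    ((key % 1024) >>> n) % 2 = (key >>> n) % 2 := by
  rw [Int.shiftRight_eq_div_pow, Int.shiftRight_eq_div_pow,
      show (((2:Nat) ^ n : Nat) : Int) = (2:Int) ^ n by push_cast; ring]
  have hq := Int.mul_ediv_add_emod key 1024
  have h2 : ((2:Int) ^ (9 - n + 1)) * 2 ^ n = 1024 := by
    rw [← pow_add]
    have : 9 - n + 1 + n = 10 := by omega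
    rw [this]; norm_num
  have hkey : key = key % 1024 + ((2:Int) ^ (9 - n + 1) * (key / 1024)) * 2 ^ n := by
    rw [show ((2:Int) ^ (9 - n + 1) * (key / 1024)) * 2 ^ n
          = ((2:Int) ^ (9 - n + 1) * 2 ^ n) * (key / 1024) by ring, h2]
    omega
  conv_rhs => rw [hkey]
  rw [Int.add_mul_ediv_right _ _ (by positivity : ((2:Int) ^ n) ≠ 0)]
  rw [show (2:Int) ^ (9 - n + 1) * (key / 1024)
        = ((2:Int) ^ (9 - n) * (key / 1024)) * 2 by rw [pow_succ]; ring]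
  generalize key % 1024 / (2:Int) ^ n = A
  generalize (2:Int) ^ (9 - n) * (key / 1024) = t
  omega

-- A's test is invariant under key ↦ key % 1024 for bit positions below 10
theorem tst (key : Int) (n : Nat) (h : n < 10) :
    (PySem.Int.band key ((1:Int) <<< n) ≠ 0) ↔ (PySem.Int.band (key % 1024) ((1:Int) <<< n) ≠ 0) := by
  rw [testA, testA, shr_emod key n h]

-- B's bit extraction is invariant under key ↦ key % 1024 for positions below 10
theorem tstB (key : Int) (n : Nat) (h : n < 10) :
    PySem.Int.band (key >>> n) 1 = PySem.Int.band ((key % 1024) >>> n) 1 := by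
  rw [PySem.Int.band_one, PySem.Int.band_one,
      PySem.Int.mod_eq_emod_of_pos (by norm_num), PySem.Int.mod_eq_emod_of_pos (by norm_num),
      shr_emod key n h]

theorem pc1_step (key acc p : Int) (h : ((10 - p).toNat) < 10) :
    (let ki := acc <<< 1;
     if PySem.Int.band key ((1:Int) <<< ((10 - p).toNat)) ≠ 0 then ki + 1 else ki)
    = (let ki := acc <<< 1;
       if PySem.Int.band (key % 1024) ((1:Int) <<< ((10 - p).toNat)) ≠ 0 then ki + 1 else ki) := by
  exact if_congr (tst key _ h) rfl rfl

theorem pc1_mod (key : Int) : PC1 key = PC1 (key % 1024) := by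
  unfold PC1
  apply PySem.List.foldl_congr_mem
  intro acc p hp
  simp only [Int.shiftLeft_natCast_right]
  apply pc1_step
  simp [P10L] at hp
  rcases hp with rfl | rfl | rfl | rfl | rfl | rfl | rfl | rfl | rfl | rfl <;> decide

theorem bits_mod (key : Int) : bitsB key = bitsB (key % 1024) := by
  unfold bitsB
  apply List.map_congr_left
  intro k hk
  simp only [List.mem_range] at hk
  rw [show (9:Int) - (k:Int) = ((9 - k : Nat) : Int) by omega, Int.shiftRight_natCast_right, Int.shiftRight_natCast_right]
  exact tstB key (9 - k) (by omega)

theorem baseA_mod (key : Int) : baseA key = baseA (key % 1024) := by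
  unfold baseA; rw [pc1_mod]

theorem baseB_mod (key : Int) : baseB key = baseB (key % 1024) := by
  unfold baseB; rw [bits_mod]

set_option maxRecDepth 8192 in
set_option maxHeartbeats 4000000 in
theorem core : ∀ m : Fin 1024, baseA ((m : Nat) : Int) = baseB ((m : Nat) : Int) := by decide

theorem base_eq (key : Int) : baseA key = baseB key := by
  rw [baseA_mod, baseB_mod]
  have h0 : 0 ≤ key % 1024 := Int.emod_nonneg _ (by norm_num)
  have h1 : key % 1024 < 1024 := Int.emod_lt_of_pos _ (by norm_num)
  have hc := core ⟨(key % 1024).toNat, by omega⟩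
  simpa [Int.toNat_of_nonneg h0] using hc

-- ===== VERDICT (by name: the statement is the Claim_ definition above) =====
theorem KeyCreater_spec : Claim_equal_KeyCreater := by
  intro key mode _
  unfold Spec_KeyCreater KeyCreater KeyCreater_alt
  rw [base_eq]
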